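-- pv_equiv track=rewrite | github.com/karthikeyansa8/testing | python/question1.py | minimum_corridor_collapses
-- ===== SOURCE A (Python) =====
-- def minimum_corridor_collapses(arr):
--     prefix = 0
--     current_min = 0
--     in_bad = False
--     collapses = 0
--
--     for x in arr:
--         prefix += x
--         if prefix < current_min:
--             in_bad = True
--         else:
--             if in_bad:
--                 collapses += 1
--                 in_bad = False
--             current_min = prefix
--
--     return collapses
-- ===== SOURCE B (Python) =====
-- def minimum_corridor_collapses(arr):
--     # Pass 1: prefix sums.
--     prefix = []
--     s = 0
--     for x in arr:
--         s += x
--         prefix.append(s)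
--     # Pass 2: record flag per position: prefix[i] >= max(0, all earlier prefixes).
--     flags = []
--     m = 0
--     for p in prefix:
--         flags.append(p >= m)
--         m = max(m, p)
--     # Pass 3: count False->True transitions (prev seeded True: initial records don't count).
--     count = 0
--     prev = True
--     for f in flags:
--         if f and not prev:
--             count += 1
--         prev = f
--     return count
-- ===== Notes on version B (the rewrite author's own statement) =====
-- stated objective: alternative
-- what changed: Replaces the single stateful scan (running max + in_bad flag + counter) by three simple passes: build prefix sums, mark record positions (prefix >= running max seeded at 0), then count False->True transitions in the record-flag sequence.
import Mathlib
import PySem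

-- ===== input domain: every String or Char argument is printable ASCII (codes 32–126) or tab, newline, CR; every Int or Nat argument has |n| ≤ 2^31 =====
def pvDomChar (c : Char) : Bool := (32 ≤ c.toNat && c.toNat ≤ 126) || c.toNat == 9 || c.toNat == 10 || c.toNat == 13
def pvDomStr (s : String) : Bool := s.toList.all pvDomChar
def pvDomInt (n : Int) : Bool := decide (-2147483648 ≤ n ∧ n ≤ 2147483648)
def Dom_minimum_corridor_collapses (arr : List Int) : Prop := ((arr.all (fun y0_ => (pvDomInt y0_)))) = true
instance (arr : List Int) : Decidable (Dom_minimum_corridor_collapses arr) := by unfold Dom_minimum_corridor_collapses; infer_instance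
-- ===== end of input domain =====

-- B replaces A's single stateful scan by three passes (prefix sums, record flags,
-- transition count); alternative decomposition, same O(n) cost.
-- ===== PORT A =====
def minimum_corridor_collapses (arr : List Int) : Int :=
  -- state = (prefix, current_min, in_bad, collapses)
  (arr.foldl (fun (st : Int × Int × Bool × Int) x =>
      let pfx := st.1 + x
      if pfx < st.2.1 then (pfx, st.2.1, true, st.2.2.2)
      else (pfx, pfx, false, if st.2.2.1 then st.2.2.2 + 1 else st.2.2.2))
    (0, 0, false, 0)).2.2.2

-- ===== PORT B =====
def minimum_corridor_collapses_alt (arr : List Int) : Int :=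
  -- pass 1: prefix sums (list built by appending, as in Source B)
  let pfx := (arr.foldl (fun (st : List Int × Int) x =>
      (st.1 ++ [st.2 + x], st.2 + x)) ([], 0)).1
  -- pass 2: record flags, running max m seeded at 0
  let flags := (pfx.foldl (fun (st : List Bool × Int) p =>
      (st.1 ++ [decide (p ≥ st.2)], max st.2 p)) ([], 0)).1
  -- pass 3: count False->True transitions, prev seeded True
  (flags.foldl (fun (st : Int × Bool) f =>
      (if f && !st.2 then st.1 + 1 else st.1, f)) (0, true)).1

-- ===== PRECONDITION & SPEC =====
def Spec_minimum_corridor_collapses (arr : List Int) (out : Int) : Prop := out = minimum_corridor_collapses_alt arr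
instance (arr : List Int) (out : Int) : Decidable (Spec_minimum_corridor_collapses arr out) := by unfold Spec_minimum_corridor_collapses; infer_instance

-- ===== CLAIM (what is proved, stated in full; the proofs are below) =====
def Claim_equal_minimum_corridor_collapses : Prop := ∀ (arr : List Int), Dom_minimum_corridor_collapses arr → Spec_minimum_corridor_collapses arr (minimum_corridor_collapses arr)

-- ===== LEMMAS AND PROOFS =====

-- ===== VERDICT (by name: the statement is the Claim_ definition above) =====
-- clean recursive reference computation shared by both proofs
def pvGo (s m : Int) (bad : Bool) : List Int → Int
  | [] => 0
  | x :: xs =>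
    if s + x < m then pvGo (s + x) m true xs
    else (if bad then 1 else 0) + pvGo (s + x) (s + x) false xs

def pvPref (s : Int) : List Int → List Int
  | [] => []
  | x :: xs => (s + x) :: pvPref (s + x) xs

def pvFlags (m : Int) : List Int → List Bool
  | [] => []
  | p :: ps => decide (p ≥ m) :: pvFlags (max m p) ps

def pvTrans (prev : Bool) : List Bool → Int
  | [] => 0
  | f :: fs => (if f && !prev then 1 else 0) + pvTrans f fs

theorem pvA_go (xs : List Int) : ∀ (p m : Int) (bad : Bool) (c : Int),
    (xs.foldl (fun (st : Int × Int × Bool × Int) x =>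
      let pfx := st.1 + x
      if pfx < st.2.1 then (pfx, st.2.1, true, st.2.2.2)
      else (pfx, pfx, false, if st.2.2.1 then st.2.2.2 + 1 else st.2.2.2))
      (p, m, bad, c)).2.2.2 = c + pvGo p m bad xs := by
  induction xs with
  | nil => intro p m bad c; simp [pvGo]
  | cons x xs ih =>
    intro p m bad c
    simp only [List.foldl, pvGo]
    by_cases h : p + x < m
    · simp [h, ih]
    · cases bad <;> simp [h, ih] <;> ring

theorem pvB_pref (xs : List Int) : ∀ (acc : List Int) (s : Int),
    (xs.foldl (fun (st : List Int × Int) x => (st.1 ++ [st.2 + x], st.2 + x)) (acc, s)).1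
      = acc ++ pvPref s xs := by
  induction xs with
  | nil => intro acc s; simp [pvPref]
  | cons x xs ih => intro acc s; simp [List.foldl, pvPref, ih]

theorem pvB_flags (ps : List Int) : ∀ (acc : List Bool) (m : Int),
    (ps.foldl (fun (st : List Bool × Int) p =>
      (st.1 ++ [decide (p ≥ st.2)], max st.2 p)) (acc, m)).1 = acc ++ pvFlags m ps := by
  induction ps with
  | nil => intro acc m; simp [pvFlags]
  | cons p ps ih => intro acc m; simp [List.foldl, pvFlags, ih]

theorem pvB_trans (fs : List Bool) : ∀ (c : Int) (prev : Bool),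
    (fs.foldl (fun (st : Int × Bool) f =>
      (if f && !st.2 then st.1 + 1 else st.1, f)) (c, prev)).1 = c + pvTrans prev fs := by
  induction fs with
  | nil => intro c prev; simp [pvTrans]
  | cons f fs ih =>
    intro c prev
    simp only [List.foldl, pvTrans, ih]
    by_cases h : (f && !prev) = true <;> simp [h] <;> ring

theorem pvMain (xs : List Int) : ∀ (s m : Int) (prev : Bool),
    pvTrans prev (pvFlags m (pvPref s xs)) = pvGo s m (!prev) xs := by
  induction xs with
  | nil => intro s m prev; simp [pvPref, pvFlags, pvTrans, pvGo]
  | cons x xs ih =>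
    intro s m prev
    simp only [pvPref, pvFlags, pvTrans, pvGo]
    by_cases h : s + x < m
    · have hd : decide (s + x ≥ m) = false := by simp; omega
      have hm : max m (s + x) = m := by omega
      simp [h, hd, hm, ih]
    · have hd : decide (s + x ≥ m) = true := by simp; omega
      have hm : max m (s + x) = s + x := by omega
      cases prev <;> simp [h, hd, hm, ih]

-- ===== VERDICT (by name: the statement is the Claim_ definition above) =====
theorem minimum_corridor_collapses_spec : Claim_equal_minimum_corridor_collapses := by
  intro arr _
  unfold Spec_minimum_corridor_collapses minimum_corridor_collapses minimum_corridor_collapses_alt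
  rw [pvA_go]
  simp only [pvB_pref, pvB_flags, pvB_trans, List.nil_append]
  rw [pvMain]
  simp
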